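-- pv_equiv track=rewrite | github.com/tarunganesh2004/GFG | 2025/October/2nd_october.py | uniqueKSum
-- ===== SOURCE A (Python) =====
-- def uniqueKSum(n,k):
--     res=[]
--     s=set()
--     def dfs(cur,start,target):
--         if target==0 and len(cur)==k:
--             res.append(cur)
--             return
--         if target<0 or len(cur)>k:
--             return
--         for i in range(start,10):
--             if i not in s:
--                 s.add(i)
--                 dfs(cur+[i],i+1,target-i)
--                 s.remove(i)
--     dfs([],1,n)
--
--     return res
-- ===== SOURCE B (Python) =====
-- def uniqueKSum(n, k):
--     out = []
--     for mask in range(1 << 9):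
--         digits = [d for d in range(1, 10) if (mask >> (d - 1)) & 1]
--         if len(digits) == k and sum(digits) == n:
--             out.append(digits)
--     out.sort()
--     return out
-- ===== Notes on version B (the rewrite author's own statement) =====
-- stated objective: alternative
-- what changed: Replaced the pruned recursive backtracking (with a mutable visited set) by exhaustive enumeration of all 512 bitmask subsets of the digits 1-9, keeping those of length k and sum n and sorting the kept lists to reproduce the lexicographic DFS emission order.
import Mathlib
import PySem

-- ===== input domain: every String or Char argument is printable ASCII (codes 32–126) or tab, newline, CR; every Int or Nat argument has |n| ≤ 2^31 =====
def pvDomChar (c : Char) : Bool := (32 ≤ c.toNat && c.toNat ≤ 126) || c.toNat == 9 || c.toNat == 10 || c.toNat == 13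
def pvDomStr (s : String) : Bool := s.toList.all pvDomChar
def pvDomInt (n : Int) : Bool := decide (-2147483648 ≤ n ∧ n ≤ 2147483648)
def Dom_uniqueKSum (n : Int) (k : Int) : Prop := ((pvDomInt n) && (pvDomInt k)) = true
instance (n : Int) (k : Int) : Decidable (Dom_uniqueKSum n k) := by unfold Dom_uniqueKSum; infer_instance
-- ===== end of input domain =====

-- B replaces A's pruned recursive backtracking by exhaustive bitmask subset enumeration
-- followed by a filter and one lexicographic sort (objective: alternative).

-- ===== PORT A =====
-- dfs, transliterated.  The Python loop body's 's.add(i); dfs(...); s.remove(i)' bracket is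
-- modelled by passing 's.add i' into the recursive call and continuing the loop with the
-- unchanged s (exact: the remove restores s).  fuel = 11 strictly exceeds the maximal
-- recursion depth (start travels 1 → 10), so the fuel-out branch is never taken.
def pvDfsA (fuel : Nat) (k : Int) (cur : List Int) (start target : Int)
    (s : PySem.Set Int) (res : List (List Int)) : List (List Int) :=
  match fuel with
  | 0 => res
  | fuel + 1 =>
    if target = 0 ∧ (cur.length : Int) = k then res ++ [cur]
    else if target < 0 ∨ (cur.length : Int) > k then res
    else
      (PySem.List.pyRange start 10).foldl
        (fun r i =>
          if PySem.Set.contains s i then r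
          else pvDfsA fuel k (cur ++ [i]) (i + 1) (target - i) (PySem.Set.add s i) r)
        res

def uniqueKSum (n : Int) (k : Int) : List (List Int) :=
  pvDfsA 11 k [] 1 n PySem.Set.empty []

-- ===== PORT B =====
-- digits for one mask: [d for d in range(1, 10) if (mask >> (d - 1)) & 1]
-- (d ranges over 1..9, so the Nat shift amount (d - 1).toNat is Python's d - 1 exactly)
def pvDecodeB (mask : Int) : List Int :=
  (PySem.List.pyRange 1 10).filter (fun d => PySem.Int.band (mask >>> (d - 1).toNat) 1 ≠ 0)

def uniqueKSum_alt (n : Int) (k : Int) : List (List Int) :=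
  let out := (PySem.List.pyRange 0 ((1 : Int) <<< (9 : Nat))).foldl
    (fun out mask =>
      let digits := pvDecodeB mask
      if (digits.length : Int) = k ∧ digits.sum = n then out ++ [digits] else out)
    []
  PySem.List.sorted out (fun x => x) false

-- ===== PRECONDITION & SPEC =====
def Spec_uniqueKSum (n : Int) (k : Int) (out : List (List Int)) : Prop := out = uniqueKSum_alt n k
instance (n : Int) (k : Int) (out : List (List Int)) : Decidable (Spec_uniqueKSum n k out) := by unfold Spec_uniqueKSum; infer_instance

-- ===== CLAIM (what is proved, stated in full; the proofs are below) =====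
def Claim_equal_uniqueKSum : Prop := ∀ (n : Int) (k : Int), Dom_uniqueKSum n k → Spec_uniqueKSum n k (uniqueKSum n k)

-- ===== LEMMAS AND PROOFS =====

-- the NONEMPTY subsets of the candidate list l, in exactly A's DFS emission order
def pvE' : List Int → List (List Int)
  | [] => []
  | d :: ds => (([] : List Int) :: pvE' ds).map (d :: ·) ++ pvE' ds

theorem pvE'_mem_mem : ∀ {l t : List Int}, t ∈ pvE' l → ∀ x ∈ t, x ∈ l := by
  intro l
  induction l with
  | nil => intro t ht; simp [pvE'] at ht
  | cons d ds ih =>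
    intro t ht x hx
    simp only [pvE', List.mem_append, List.mem_map] at ht
    rcases ht with ⟨t', ht', rfl⟩ | ht
    · rcases List.mem_cons.mp hx with rfl | hx'
      · exact List.mem_cons_self
      · rcases List.mem_cons.mp ht' with rfl | ht''
        · simp at hx'
        · exact List.mem_cons_of_mem _ (ih ht'' x hx')
    · exact List.mem_cons_of_mem _ (ih ht x hx)

theorem pvE'_shape : ∀ {l t : List Int}, t ∈ pvE' l → ∃ h tl, t = h :: tl ∧ h ∈ l := by
  intro l
  induction l with
  | nil => intro t ht; simp [pvE'] at ht
  | cons d ds ih =>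
    intro t ht
    simp only [pvE', List.mem_append, List.mem_map] at ht
    rcases ht with ⟨t', _, rfl⟩ | ht
    · exact ⟨d, t', rfl, List.mem_cons_self⟩
    · obtain ⟨h, tl, rfl, hh⟩ := ih ht
      exact ⟨h, tl, rfl, List.mem_cons_of_mem _ hh⟩

theorem pvE'_sum_pos {l : List Int} (hl : ∀ x ∈ l, (1 : Int) ≤ x) {t : List Int}
    (ht : t ∈ pvE' l) : 1 ≤ t.sum := by
  obtain ⟨h, tl, rfl, hh⟩ := pvE'_shape ht
  have h1 : (1 : Int) ≤ h := hl h hh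
  have h2 : (0 : Int) ≤ tl.sum := by
    apply List.sum_nonneg
    intro x hx
    exact le_trans (by norm_num) (hl x (pvE'_mem_mem ht x (List.mem_cons_of_mem _ hx)))
  simp only [List.sum_cons]
  omega

theorem pvFlatMapPerm {α : Type} (g : α → α) (l : List α) :
    (l.flatMap fun x => [x, g x]).Perm (l ++ l.map g) := by
  induction l with
  | nil => simp
  | cons x rest ih =>
    simp only [List.flatMap_cons, List.map_cons]
    have h1 : ([x, g x] ++ rest.flatMap fun y => [y, g y]).Perm
        ([x, g x] ++ (rest ++ rest.map g)) := ih.append_left _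
    refine h1.trans ?_
    show (x :: (g x :: (rest ++ rest.map g))).Perm ((x :: rest) ++ (g x :: rest.map g))
    exact List.Perm.cons _ List.perm_middle.symm

theorem pvE'_perm_sublists (l : List Int) :
    (([] : List Int) :: pvE' l).Perm l.sublists := by
  induction l with
  | nil => simp [pvE']
  | cons d ds ih =>
    rw [List.sublists_cons]
    have step1 : (([] : List Int) :: pvE' (d :: ds)).Perm
        ((([] : List Int) :: pvE' ds) ++ (([] : List Int) :: pvE' ds).map (d :: ·)) := by
      simp only [pvE']
      calc (([] : List Int) :: ((([] : List Int) :: pvE' ds).map (d :: ·) ++ pvE' ds)).Perm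
            (([] : List Int) :: (pvE' ds ++ (([] : List Int) :: pvE' ds).map (d :: ·))) :=
              List.Perm.cons _ List.perm_append_comm
        _ = (([] : List Int) :: pvE' ds) ++ (([] : List Int) :: pvE' ds).map (d :: ·) := rfl
    refine step1.trans ?_
    refine (ih.append (ih.map _)).trans ?_
    exact (pvFlatMapPerm (d :: ·) ds.sublists).symm

theorem pvE'_pairwise : ∀ {l : List Int}, l.Pairwise (· < ·) →
    ((([] : List Int) :: pvE' l)).Pairwise (fun a b : List Int => a < b) := by
  intro l
  induction l with
  | nil => intro _; simp [pvE']
  | cons d ds ih =>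
    intro hl
    rcases List.pairwise_cons.mp hl with ⟨hd, hds⟩
    have ihp := ih hds
    rw [List.pairwise_cons]
    constructor
    · -- [] is lex-smaller than every (nonempty) element
      intro t ht
      simp only [pvE', List.mem_append, List.mem_map] at ht
      rcases ht with ⟨t', _, rfl⟩ | ht
      · exact List.nil_lt_cons _ _
      · obtain ⟨h, tl, rfl, _⟩ := pvE'_shape ht
        exact List.nil_lt_cons _ _
    · simp only [pvE']
      rw [List.pairwise_append]
      refine ⟨?_, List.Pairwise.of_cons ihp, ?_⟩
      · exact ihp.map _ (fun a b hab => List.cons_lt_cons_self.mpr hab)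
      · intro x hx y hy
        rcases List.mem_map.mp hx with ⟨x', _, rfl⟩
        obtain ⟨h, tl, rfl, hh⟩ := pvE'_shape hy
        exact List.Lex.rel (hd h hh)

theorem pvNotContains (s : PySem.Set Int) (i : Int) :
    PySem.Set.contains s i = false ↔ i ∉ s := by
  rw [← PySem.Set.contains_iff]
  cases PySem.Set.contains s i <;> simp

theorem pvLoopA (fuel : Nat) (k : Int)
    (IH : ∀ (cur : List Int) (start target : Int) (s : PySem.Set Int) res,
      1 ≤ start → (10 - start).toNat < fuel →
      (∀ i : Int, start ≤ i → i < 10 → PySem.Set.contains s i = false) →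
      pvDfsA fuel k cur start target s res
        = res ++ (((([] : List Int) :: pvE' (PySem.List.pyRange start 10)).filter
            (fun t => decide (t.sum = target ∧ (cur.length : Int) + t.length = k))).map (cur ++ ·))) :
    ∀ (cnt : Nat) (c : Int) (cur : List Int) (target : Int) (s : PySem.Set Int) res,
      1 ≤ c → (10 - c).toNat = cnt → cnt ≤ fuel →
      (∀ i : Int, c ≤ i → i < 10 → PySem.Set.contains s i = false) →
      (PySem.List.pyRange c 10).foldl
        (fun r i =>
          if PySem.Set.contains s i then r
          else pvDfsA fuel k (cur ++ [i]) (i + 1) (target - i) (PySem.Set.add s i) r) res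
      = res ++ (((pvE' (PySem.List.pyRange c 10)).filter
            (fun t => decide (t.sum = target ∧ (cur.length : Int) + t.length = k))).map (cur ++ ·)) := by
  intro cnt
  induction cnt with
  | zero =>
    intro c cur target s res h1 hcnt _ _
    have hnil : PySem.List.pyRange c 10 = [] := by
      rw [PySem.List.pyRange_one]
      simp [show (10 - c).toNat = 0 from hcnt]
    simp [hnil, pvE']
  | succ m ihm =>
    intro c cur target s res h1 hcnt hle hs
    have hc10 : c < 10 := by omega
    rw [PySem.List.pyRange_one_cons hc10]
    simp only [List.foldl_cons, hs c le_rfl hc10, Bool.false_eq_true, if_false]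
    rw [IH (cur ++ [c]) (c + 1) (target - c) (PySem.Set.add s c) res (by omega) (by omega) ?hadd]
    case hadd =>
      intro i hi1 hi2
      rw [pvNotContains, PySem.Set.mem_add]
      push Not
      exact ⟨(pvNotContains s i).mp (hs i (by omega) hi2), by omega⟩
    rw [ihm (c + 1) cur target s _ (by omega) (by omega) (by omega)
      (fun i hi1 hi2 => hs i (by omega) hi2)]
    -- now both sides are res ++ … : rearrange the RHS
    conv_rhs => rw [show pvE' (c :: PySem.List.pyRange (c + 1) 10)
      = (([] : List Int) :: pvE' (PySem.List.pyRange (c + 1) 10)).map (c :: ·)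
          ++ pvE' (PySem.List.pyRange (c + 1) 10) from rfl]
    rw [List.filter_append, List.map_append, List.append_assoc]
    congr 1
    congr 1
    -- the head-branch block
    rw [List.filter_map]
    rw [List.map_map]
    apply congrArg₂
    · funext t
      simp [Function.comp]
    · apply List.filter_congr
      intro t _
      simp only [Function.comp_apply, decide_eq_decide, List.sum_cons, List.length_cons,
        List.length_append, List.length_nil]
      push_cast
      omega

theorem pvRange_ge_one {start : Int} (h1 : 1 ≤ start) :
    ∀ x ∈ PySem.List.pyRange start 10, (1 : Int) ≤ x := by
  intro x hx
  have := (PySem.List.mem_pyRange_one).mp hx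
  omega

theorem pvDfsA_spec :
    ∀ (fuel : Nat) (k : Int) (cur : List Int) (start target : Int)
      (s : PySem.Set Int) (res : List (List Int)),
      1 ≤ start → (10 - start).toNat < fuel →
      (∀ i : Int, start ≤ i → i < 10 → PySem.Set.contains s i = false) →
      pvDfsA fuel k cur start target s res
        = res ++ (((([] : List Int) :: pvE' (PySem.List.pyRange start 10)).filter
            (fun t => decide (t.sum = target ∧ (cur.length : Int) + t.length = k))).map (cur ++ ·)) := by
  intro fuel
  induction fuel with
  | zero => intro _ _ _ _ _ _ _ h _; omega
  | succ fuel ihf =>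
    intro k cur start target s res h1 hfuel hs
    have hsum1 : ∀ t ∈ pvE' (PySem.List.pyRange start 10), (1 : Int) ≤ t.sum :=
      fun t ht => pvE'_sum_pos (pvRange_ge_one h1) ht
    show (if target = 0 ∧ (cur.length : Int) = k then res ++ [cur]
      else if target < 0 ∨ (cur.length : Int) > k then res
      else (PySem.List.pyRange start 10).foldl
        (fun r i =>
          if PySem.Set.contains s i then r
          else pvDfsA fuel k (cur ++ [i]) (i + 1) (target - i) (PySem.Set.add s i) r)
        res) = _
    by_cases hb1 : target = 0 ∧ (cur.length : Int) = k
    · rw [if_pos hb1]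
      rw [List.filter_cons_of_pos (by simp [hb1.1, hb1.2])]
      rw [show (pvE' (PySem.List.pyRange start 10)).filter
          (fun t => decide (t.sum = target ∧ (cur.length : Int) + t.length = k)) = [] from
        List.filter_eq_nil_iff.mpr (by
          intro t ht
          have := hsum1 t ht
          simp only [decide_eq_true_eq, not_and]
          intro hsum
          omega)]
      simp
    · rw [if_neg hb1]
      have hnil2 : ¬ ((([] : List Int)).sum = target
          ∧ ((cur.length : Int)) + ((([] : List Int)).length : Int) = k) := by
        simp only [List.sum_nil, List.length_nil]
        intro h
        exact hb1 ⟨h.1.symm, by have := h.2; omega⟩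
      by_cases hb2 : target < 0 ∨ (cur.length : Int) > k
      · rw [if_pos hb2]
        rw [List.filter_cons_of_neg (by simpa using hnil2)]
        rw [show (pvE' (PySem.List.pyRange start 10)).filter
            (fun t => decide (t.sum = target ∧ (cur.length : Int) + t.length = k)) = [] from
          List.filter_eq_nil_iff.mpr (by
            intro t ht
            have := hsum1 t ht
            simp only [decide_eq_true_eq, not_and]
            intro hsum
            omega)]
        simp
      · rw [if_neg hb2]
        rw [pvLoopA fuel k (ihf k) (10 - start).toNat start cur target s res h1 rfl (by omega) hs]
        rw [List.filter_cons_of_neg (by simpa using hnil2)]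


set_option maxRecDepth 10000 in
theorem pvDecode_eq_sublists :
    (PySem.List.pyRange 0 ((1 : Int) <<< (9 : Nat))).map pvDecodeB
      = List.sublists [1, 2, 3, 4, 5, 6, 7, 8, 9] := by decide

set_option maxRecDepth 10000 in
theorem pvAlt_char (n k : Int) :
    uniqueKSum_alt n k
      = PySem.List.sorted ((List.sublists [1, 2, 3, 4, 5, 6, 7, 8, 9]).filter
          (fun t => decide ((t.length : Int) = k ∧ t.sum = n))) (fun x => x) false := by
  show PySem.List.sorted
      ((PySem.List.pyRange 0 ((1 : Int) <<< (9 : Nat))).foldl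
        (fun out mask =>
          let digits := pvDecodeB mask
          if (digits.length : Int) = k ∧ digits.sum = n then out ++ [digits] else out) [])
      (fun x => x) false = _
  congr 1
  have hfun : (fun (out : List (List Int)) (mask : Int) =>
      let digits := pvDecodeB mask
      if (digits.length : Int) = k ∧ digits.sum = n then out ++ [digits] else out)
      = fun out mask =>
        if ((fun t => decide ((t.length : Int) = k ∧ t.sum = n)) ∘ pvDecodeB) mask = true
        then out ++ [pvDecodeB mask] else out := by
    funext out mask
    simp [Function.comp]
  rw [hfun, PySem.List.foldl_append_if, ← List.filter_map, pvDecode_eq_sublists]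
  rfl

set_option maxRecDepth 10000 in
theorem uniqueKSum_eq (n k : Int) : uniqueKSum n k = uniqueKSum_alt n k := by
  have hA : uniqueKSum n k
      = (([] : List Int) :: pvE' (PySem.List.pyRange 1 10)).filter
          (fun t => decide (t.sum = n ∧ ((([] : List Int)).length : Int) + t.length = k)) := by
    show pvDfsA 11 k [] 1 n PySem.Set.empty [] = _
    rw [pvDfsA_spec 11 k [] 1 n PySem.Set.empty [] (by norm_num) (by norm_num)
      (fun i _ _ => rfl)]
    simp
  have hR : PySem.List.pyRange 1 10 = [1, 2, 3, 4, 5, 6, 7, 8, 9] := by decide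
  have hfilter : (([] : List Int) :: pvE' (PySem.List.pyRange 1 10)).filter
        (fun t => decide (t.sum = n ∧ ((([] : List Int)).length : Int) + t.length = k))
      = (([] : List Int) :: pvE' [1, 2, 3, 4, 5, 6, 7, 8, 9]).filter
        (fun t => decide ((t.length : Int) = k ∧ t.sum = n)) := by
    rw [hR]
    apply List.filter_congr
    intro t _
    simp only [decide_eq_decide, List.length_nil]
    constructor
    · rintro ⟨h1, h2⟩; exact ⟨by omega, h1⟩
    · rintro ⟨h1, h2⟩; exact ⟨h2, by omega⟩
  rw [hA, hfilter, pvAlt_char]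
  symm
  rw [show (fun (a b : List Int) => a.decidableLT b) = (LinearOrder.toDecidableLT (α := List Int))
    from funext fun a => funext fun b => Subsingleton.elim _ _]
  exact PySem.List.sorted_eq_of_perm_of_pairwise_lt _ _ _
    ((pvE'_perm_sublists [1, 2, 3, 4, 5, 6, 7, 8, 9]).filter _)
    ((pvE'_pairwise (by decide)).filter _)

-- ===== VERDICT (by name: the statement is the Claim_ definition above) =====
theorem uniqueKSum_spec : Claim_equal_uniqueKSum := by
  intro n k _
  exact uniqueKSum_eq n k
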